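-- pv_equiv track=rewrite | github.com/bishop527/house_hunt | Housing/process_fbi_crime_data.py | pass_fbi_mapping
-- ===== SOURCE A (Python) =====
-- def pass_fbi_mapping(offense_name):
--     """
--     Map general FBI NIBRS offense descriptors to our severity weights.
--     Returns 5 (High), 3 (Medium), 1 (Low), or 0 for ignored anomalies.
--     """
--     offense = str(offense_name).lower()
--
--     # High Severity
--     if any(k in offense for k in ['murder', 'homicide', 'rape', 'robbery', 'aggravated assault', 'kidnapping']):
--         return 5
--     # Medium Severity
--     elif any(k in offense for k in ['burglary', 'motor vehicle theft', 'arson', 'weapon']):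
--         return 3
--     # Low Severity
--     elif any(k in offense for k in ['larceny', 'theft', 'assault', 'fraud', 'vandalism', 'drug']):
--         return 1
--     return 0
-- ===== SOURCE B (Python) =====
-- # Single left-to-right scan over the offense string (multi-pattern matcher):
-- # at each position, a first-character-indexed table dispatches to the few
-- # keywords that could start there, instead of A's per-keyword substring cascade.
-- _BY_FIRST = {
--     'm': [('murder', 5), ('motor vehicle theft', 3)],
--     'h': [('homicide', 5)],
--     'r': [('rape', 5), ('robbery', 5)],
--     'a': [('aggravated assault', 5), ('arson', 3), ('assault', 1)],
--     'k': [('kidnapping', 5)],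
--     'b': [('burglary', 3)],
--     'w': [('weapon', 3)],
--     'l': [('larceny', 1)],
--     't': [('theft', 1)],
--     'f': [('fraud', 1)],
--     'v': [('vandalism', 1)],
--     'd': [('drug', 1)],
-- }
--
-- def pass_fbi_mapping(offense_name):
--     offense = str(offense_name).lower()
--     best = 0
--     for i, ch in enumerate(offense):
--         for kw, w in _BY_FIRST.get(ch, ()):
--             if w > best and offense.startswith(kw, i):
--                 best = w
--     return best
-- ===== Notes on version B (the rewrite author's own statement) =====
-- stated objective: alternative
-- what changed: Replaced A's per-keyword substring cascade (any() over three keyword lists, each membership test rescanning the whole string) by a single left-to-right scan over the offense string with a first-character-indexed keyword table: at each position only the few keywords that could start there are prefix-tested, and the best weight seen is kept.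
import Mathlib
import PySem

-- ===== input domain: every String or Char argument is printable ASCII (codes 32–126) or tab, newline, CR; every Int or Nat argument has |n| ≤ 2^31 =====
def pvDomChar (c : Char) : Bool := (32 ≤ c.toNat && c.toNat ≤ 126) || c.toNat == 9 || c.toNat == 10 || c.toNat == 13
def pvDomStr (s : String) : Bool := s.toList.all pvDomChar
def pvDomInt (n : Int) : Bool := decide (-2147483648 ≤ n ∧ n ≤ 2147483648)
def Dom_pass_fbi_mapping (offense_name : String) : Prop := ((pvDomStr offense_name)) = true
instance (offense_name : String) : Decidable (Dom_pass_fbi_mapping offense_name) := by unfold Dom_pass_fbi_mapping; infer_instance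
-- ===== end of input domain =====

-- B replaces A's per-keyword any()-cascade by a single left-to-right scan of the
-- string with a first-character-indexed keyword table (simpler dispatch, one pass).


-- ===== PORT A =====
def pass_fbi_mapping (offense_name : String) : Int :=
  let offense := PySem.Str.lower offense_name
  if ["murder", "homicide", "rape", "robbery", "aggravated assault", "kidnapping"].any
      (fun k => PySem.Str.isIn k offense) then 5
  else if ["burglary", "motor vehicle theft", "arson", "weapon"].any
      (fun k => PySem.Str.isIn k offense) then 3
  else if ["larceny", "theft", "assault", "fraud", "vandalism", "drug"].any
      (fun k => PySem.Str.isIn k offense) then 1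
  else 0

-- ===== PORT B =====
-- Source B's module-level dict _BY_FIRST: first character -> keywords starting with it
def pvByFirst : PySem.Dict Char (List (String × Int)) := PySem.Dict.mk
  [('m', [("murder", 5), ("motor vehicle theft", 3)]),
   ('h', [("homicide", 5)]),
   ('r', [("rape", 5), ("robbery", 5)]),
   ('a', [("aggravated assault", 5), ("arson", 3), ("assault", 1)]),
   ('k', [("kidnapping", 5)]),
   ('b', [("burglary", 3)]),
   ('w', [("weapon", 3)]),
   ('l', [("larceny", 1)]),
   ('t', [("theft", 1)]),
   ('f', [("fraud", 1)]),
   ('v', [("vandalism", 1)]),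
   ('d', [("drug", 1)])]

-- the outer loop over positions: at each position i the remaining suffix is c :: rest,
-- `offense.startswith(kw, i)` is `kw.toList <+: (c :: rest)` = PySem.Chars.startswith
def pvScan : List Char → Int → Int
  | [], best => best
  | c :: rest, best =>
      let best' := (PySem.Dict.getD pvByFirst c []).foldl
        (fun b q => if b < q.2 ∧ PySem.Chars.startswith (c :: rest) q.1.toList = true then q.2 else b)
        best
      pvScan rest best'

def pass_fbi_mapping_alt (offense_name : String) : Int :=
  let offense := PySem.Str.lower offense_name
  pvScan offense.toList 0

-- ===== PRECONDITION & SPEC =====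
def Spec_pass_fbi_mapping (offense_name : String) (out : Int) : Prop := out = pass_fbi_mapping_alt offense_name
instance (offense_name : String) (out : Int) : Decidable (Spec_pass_fbi_mapping offense_name out) := by unfold Spec_pass_fbi_mapping; infer_instance

-- ===== CLAIM (what is proved, stated in full; the proofs are below) =====
def Claim_equal_pass_fbi_mapping : Prop := ∀ (offense_name : String), Dom_pass_fbi_mapping offense_name → Spec_pass_fbi_mapping offense_name (pass_fbi_mapping offense_name)

-- ===== LEMMAS AND PROOFS =====

-- the flat list of all table entries
def pvEntries : List (String × Int) :=
  [("murder", 5), ("motor vehicle theft", 3), ("homicide", 5), ("rape", 5), ("robbery", 5),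
   ("aggravated assault", 5), ("arson", 3), ("assault", 1), ("kidnapping", 5), ("burglary", 3),
   ("weapon", 3), ("larceny", 1), ("theft", 1), ("fraud", 1), ("vandalism", 1), ("drug", 1)]

-- every bucket entry is a table entry
theorem pv_bucket_sub (c : Char) (p : String × Int)
    (hp : p ∈ PySem.Dict.getD pvByFirst c []) : p ∈ pvEntries := by
  simp only [pvByFirst, PySem.Dict.getD, PySem.Dict.get?, List.find?] at hp
  repeat' split at hp
  all_goals simp_all [pvEntries] <;> tauto

-- the inner fold only raises the accumulator
theorem pv_inner_mono (suf : List Char) (l : List (String × Int)) (b : Int) :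
    b ≤ l.foldl (fun b q => if b < q.2 ∧ PySem.Chars.startswith suf q.1.toList = true then q.2 else b) b := by
  induction l generalizing b with
  | nil => simp
  | cons p t ih =>
    refine le_trans ?_ (ih _)
    by_cases h : b < p.2 ∧ PySem.Chars.startswith suf p.1.toList = true
    · simp only [h]; exact le_of_lt h.1
    · simp [h]

-- a matching entry's weight is reached by the inner fold
theorem pv_inner_reach (suf : List Char) (p : String × Int)
    (hs : PySem.Chars.startswith suf p.1.toList = true) :
    ∀ (l : List (String × Int)) (b : Int), p ∈ l →
      p.2 ≤ l.foldl (fun b q => if b < q.2 ∧ PySem.Chars.startswith suf q.1.toList = true then q.2 else b) b := by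
  intro l
  induction l with
  | nil => intro b h; simp at h
  | cons x t ih =>
    intro b hm
    rcases List.mem_cons.mp hm with rfl | hm
    · simp only [List.foldl_cons]
      by_cases hb : b < p.2
      · simpa [hb, hs] using pv_inner_mono suf t p.2
      · have hpb : p.2 ≤ b := le_of_not_gt hb
        simpa [hb] using le_trans hpb (pv_inner_mono suf t b)
    · simp only [List.foldl_cons]
      exact ih _ hm

-- upper bound for the inner fold
theorem pv_inner_le (suf : List Char) (cb : Int) :
    ∀ (l : List (String × Int)) (b : Int),
      (∀ p ∈ l, PySem.Chars.startswith suf p.1.toList = true → p.2 ≤ cb) → b ≤ cb →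
      l.foldl (fun b q => if b < q.2 ∧ PySem.Chars.startswith suf q.1.toList = true then q.2 else b) b ≤ cb := by
  intro l
  induction l with
  | nil => intro b _ hb; simpa using hb
  | cons x t ih =>
    intro b hall hb
    simp only [List.foldl_cons]
    refine ih _ (fun p hp => hall p (List.mem_cons_of_mem _ hp)) ?_
    by_cases h : b < x.2 ∧ PySem.Chars.startswith suf x.1.toList = true
    · simp only [h]; exact hall x List.mem_cons_self h.2
    · simpa [h] using hb

-- the scan only raises the accumulator
theorem pv_scan_mono (L : List Char) : ∀ (b : Int), b ≤ pvScan L b := by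
  induction L with
  | nil => intro b; simp [pvScan]
  | cons c rest ih =>
    intro b
    exact le_trans (pv_inner_mono (c :: rest) _ b) (ih _)

-- an entry that is an infix of L (and whose keyword is in the bucket of its head) is reached
theorem pv_scan_reach (p : String × Int) (hne : p.1.toList ≠ [])
    (hp : ∀ c, p.1.toList.head? = some c → p ∈ PySem.Dict.getD pvByFirst c []) :
    ∀ (L : List Char) (b : Int), p.1.toList <:+: L → p.2 ≤ pvScan L b := by
  intro L
  induction L with
  | nil =>
    intro b h
    exact absurd (List.eq_nil_of_infix_nil h) hne
  | cons c rest ih =>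
    intro b hinf
    rcases List.infix_cons_iff.mp hinf with hpre | hres
    · have hsw : PySem.Chars.startswith (c :: rest) p.1.toList = true :=
        (PySem.Chars.startswith_iff _ _).mpr hpre
      have hc : p.1.toList.head? = some c := by
        obtain ⟨tl, htl⟩ := hpre
        cases hcase : p.1.toList with
        | nil => exact absurd hcase hne
        | cons a l =>
          rw [hcase] at htl
          simp only [List.cons_append, List.cons.injEq] at htl
          simp [htl.1]
      have : p.2 ≤ (PySem.Dict.getD pvByFirst c []).foldl
          (fun b q => if b < q.2 ∧ PySem.Chars.startswith (c :: rest) q.1.toList = true then q.2 else b) b :=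
        pv_inner_reach (c :: rest) p hsw _ b (hp c hc)
      exact le_trans this (pv_scan_mono rest _)
    · exact ih _ hres

-- upper bound for the scan
theorem pv_scan_le (cb : Int) :
    ∀ (L : List Char) (b : Int),
      (∀ p ∈ pvEntries, p.1.toList <:+: L → p.2 ≤ cb) → b ≤ cb → pvScan L b ≤ cb := by
  intro L
  induction L with
  | nil => intro b _ hb; simpa [pvScan] using hb
  | cons c rest ih =>
    intro b hall hb
    show pvScan rest _ ≤ cb
    refine ih _ (fun p hp hinf => hall p hp (hinf.trans (List.suffix_cons c rest).isInfix)) ?_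
    refine pv_inner_le (c :: rest) cb _ b ?_ hb
    intro p hp hsw
    exact hall p (pv_bucket_sub c p hp)
      (List.IsPrefix.isInfix ((PySem.Chars.startswith_iff _ _).mp hsw))

-- bridge: a false membership test in A gives a non-infix fact for B's scan
theorem pv_not_infix {k off : String} (h : ¬ PySem.Str.isIn k off = true) :
    ¬ (k.toList <:+: off.toList) :=
  fun hinf => h ((PySem.Str.isIn_iff_infix k off).mpr hinf)

-- ===== VERDICT (by name: the statement is the Claim_ definition above) =====
set_option maxHeartbeats 2000000 in
theorem pass_fbi_mapping_spec : Claim_equal_pass_fbi_mapping := by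
  intro s _
  unfold Spec_pass_fbi_mapping pass_fbi_mapping pass_fbi_mapping_alt
  set off := PySem.Str.lower s with hoff
  by_cases h5 : (["murder", "homicide", "rape", "robbery", "aggravated assault", "kidnapping"].any
      (fun k => PySem.Str.isIn k off)) = true
  · rw [if_pos h5]
    simp only [List.any_eq_true] at h5
    obtain ⟨k, hk, hik⟩ := h5
    refine le_antisymm ?_ (pv_scan_le 5 off.toList 0 (fun p hp _ => by fin_cases hp <;> norm_num) (by norm_num))
    have hinf := (PySem.Str.isIn_iff_infix k off).mp hik
    fin_cases hk <;>
      exact pv_scan_reach (_, 5) (by decide)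
        (by intro c hc; simp only [List.head?] at hc; injection hc with hc; subst hc; decide)
        off.toList 0 hinf
  · rw [if_neg h5]
    rw [Bool.not_eq_true, List.any_eq_false] at h5
    simp only [List.mem_cons, List.not_mem_nil, or_false, forall_eq_or_imp, forall_eq] at h5
    obtain ⟨e1, e2, e3, e4, e5, e6⟩ := h5
    have E1 := pv_not_infix e1; have E2 := pv_not_infix e2; have E3 := pv_not_infix e3
    have E4 := pv_not_infix e4; have E5 := pv_not_infix e5; have E6 := pv_not_infix e6
    by_cases h3 : (["burglary", "motor vehicle theft", "arson", "weapon"].any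
        (fun k => PySem.Str.isIn k off)) = true
    · rw [if_pos h3]
      simp only [List.any_eq_true] at h3
      obtain ⟨k, hk, hik⟩ := h3
      refine le_antisymm ?_ (pv_scan_le 3 off.toList 0 ?_ (by norm_num))
      · have hinf := (PySem.Str.isIn_iff_infix k off).mp hik
        fin_cases hk <;>
          exact pv_scan_reach (_, 3) (by decide)
            (by intro c hc; simp only [List.head?] at hc; injection hc with hc; subst hc; decide)
            off.toList 0 hinf
      · intro p hp hinf
        fin_cases hp <;>
          first
            | decide
            | exact absurd hinf E1 | exact absurd hinf E2 | exact absurd hinf E3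
            | exact absurd hinf E4 | exact absurd hinf E5 | exact absurd hinf E6
    · rw [if_neg h3]
      rw [Bool.not_eq_true, List.any_eq_false] at h3
      simp only [List.mem_cons, List.not_mem_nil, or_false, forall_eq_or_imp, forall_eq] at h3
      obtain ⟨f1, f2, f3, f4⟩ := h3
      have F1 := pv_not_infix f1; have F2 := pv_not_infix f2
      have F3 := pv_not_infix f3; have F4 := pv_not_infix f4
      by_cases h1 : (["larceny", "theft", "assault", "fraud", "vandalism", "drug"].any
          (fun k => PySem.Str.isIn k off)) = true
      · rw [if_pos h1]
        simp only [List.any_eq_true] at h1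
        obtain ⟨k, hk, hik⟩ := h1
        refine le_antisymm ?_ (pv_scan_le 1 off.toList 0 ?_ (by norm_num))
        · have hinf := (PySem.Str.isIn_iff_infix k off).mp hik
          fin_cases hk <;>
            exact pv_scan_reach (_, 1) (by decide)
              (by intro c hc; simp only [List.head?] at hc; injection hc with hc; subst hc; decide)
              off.toList 0 hinf
        · intro p hp hinf
          fin_cases hp <;>
            first
              | decide
              | exact absurd hinf E1 | exact absurd hinf E2 | exact absurd hinf E3
              | exact absurd hinf E4 | exact absurd hinf E5 | exact absurd hinf E6
              | exact absurd hinf F1 | exact absurd hinf F2 | exact absurd hinf F3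
              | exact absurd hinf F4
      · rw [if_neg h1]
        rw [Bool.not_eq_true, List.any_eq_false] at h1
        simp only [List.mem_cons, List.not_mem_nil, or_false, forall_eq_or_imp, forall_eq] at h1
        obtain ⟨g1, g2, g3, g4, g5, g6⟩ := h1
        have G1 := pv_not_infix g1; have G2 := pv_not_infix g2; have G3 := pv_not_infix g3
        have G4 := pv_not_infix g4; have G5 := pv_not_infix g5; have G6 := pv_not_infix g6
        refine le_antisymm (pv_scan_mono off.toList 0) (pv_scan_le 0 off.toList 0 ?_ le_rfl)
        intro p hp hinf
        fin_cases hp <;>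
          first
            | exact absurd hinf E1 | exact absurd hinf E2 | exact absurd hinf E3
            | exact absurd hinf E4 | exact absurd hinf E5 | exact absurd hinf E6
            | exact absurd hinf F1 | exact absurd hinf F2 | exact absurd hinf F3
            | exact absurd hinf F4
            | exact absurd hinf G1 | exact absurd hinf G2 | exact absurd hinf G3
            | exact absurd hinf G4 | exact absurd hinf G5 | exact absurd hinf G6
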